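-- pv_equiv track=rewrite | github.com/MrBrantCode/unitest_baseline | mut_generate/mist_train_taco/taco_11225/solution.py | max_subset_size
-- ===== SOURCE A (Python) =====
-- def max_subset_size(test_cases):
--     results = []
--
--     for case in test_cases:
--         n = len(case)
--         pointList = []
--         pointOrderDict = {}
--         interval = case
--         intervalOrder = []
--
--         for l, r in interval:
--             pointList.append(l)
--             pointList.append(r)
--
--         pointList.sort()
--         cnt = 0
--
--         for i in range(2 * n):
--             if i == 0 or pointList[i] != pointList[i - 1]:
--                 pointOrderDict[pointList[i]] = cnt
--                 cnt += 1
--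
--         for elem in interval:
--             intervalOrder.append((pointOrderDict[elem[0]], pointOrderDict[elem[1]]))
--
--         intervalList = []
--         dp = []
--
--         for i in range(cnt):
--             dp.append([])
--             intervalList.append([])
--             for j in range(cnt):
--                 dp[i].append(-1)
--
--         for elem in intervalOrder:
--             intervalList[elem[0]].append(elem[1])
--
--         for i in range(cnt):
--             for j in range(cnt - i):
--                 ans1 = 0
--                 ans2 = 0
--                 if i != 0:
--                     ans2 = dp[j + 1][i + j]
--                 for elem in intervalList[j]:
--                     if elem == i + j:
--                         ans1 += 1
--                     elif elem < i + j and ans2 < dp[j][elem] + dp[elem + 1][i + j]: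
--                         ans2 = dp[j][elem] + dp[elem + 1][i + j]
--                 dp[j][i + j] = ans1 + ans2
--
--         results.append(dp[0][cnt - 1])
--
--     return results
-- ===== SOURCE B (Python) =====
-- def max_subset_size(test_cases):
--     results = []
--     for case in test_cases:
--         n = len(case)
--         pointList = []
--         pointOrderDict = {}
--         interval = case
--         intervalOrder = []
--         for l, r in interval:
--             pointList.append(l)
--             pointList.append(r)
--         pointList.sort()
--         cnt = 0
--         for i in range(2 * n):
--             if i == 0 or pointList[i] != pointList[i - 1]:
--                 pointOrderDict[pointList[i]] = cnt
--                 cnt += 1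
--         for elem in interval:
--             intervalOrder.append((pointOrderDict[elem[0]], pointOrderDict[elem[1]]))
--         intervalList = [[] for _ in range(cnt)]
--         for elem in intervalOrder:
--             intervalList[elem[0]].append(elem[1])
--         # Top-down memoized recursion over compressed coordinates: f(j, k) is the
--         # best count using only intervals inside [j, k]; computed on demand.
--         memo = {}
--         def f(j, k):
--             got = memo.get((j, k))
--             if got is not None:
--                 return got
--             best = f(j + 1, k) if j < k else 0
--             exact = 0
--             for e in intervalList[j]:
--                 if e == k:
--                     exact += 1
--                 elif j <= e < k:
--                     c = f(j, e) + f(e + 1, k)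
--                     if best < c:
--                         best = c
--             memo[(j, k)] = exact + best
--             return exact + best
--         results.append(f(0, cnt - 1))
--     return results
-- ===== Notes on version B (the rewrite author's own statement) =====
-- stated objective: alternative
-- what changed: The bottom-up span-by-span triple loop filling a cnt x cnt matrix pre-initialised to the -1 sentinel is replaced by a top-down memoized recursive function f(j,k) over a dict, which computes subproblems on demand (only reachable (j,k) pairs are ever evaluated) and needs no sentinel; junk candidates with split point e < j (possible for reversed intervals l > r), which in A always read two -1 sentinels and never win, are skipped by the guard j <= e < k.
import Mathlib
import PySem

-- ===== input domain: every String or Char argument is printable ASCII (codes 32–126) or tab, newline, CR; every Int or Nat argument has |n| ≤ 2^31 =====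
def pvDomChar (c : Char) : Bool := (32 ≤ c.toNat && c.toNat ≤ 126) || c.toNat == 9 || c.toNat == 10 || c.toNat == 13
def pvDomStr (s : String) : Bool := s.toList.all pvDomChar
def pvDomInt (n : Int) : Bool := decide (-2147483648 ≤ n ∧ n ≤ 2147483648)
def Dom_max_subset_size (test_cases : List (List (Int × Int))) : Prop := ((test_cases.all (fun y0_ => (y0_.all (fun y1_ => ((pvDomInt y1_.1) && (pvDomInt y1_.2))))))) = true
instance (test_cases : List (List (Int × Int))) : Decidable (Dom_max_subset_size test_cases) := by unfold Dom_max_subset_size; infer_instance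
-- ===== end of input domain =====

-- B replaces A's bottom-up span-by-span triple-loop fill of a cnt×cnt matrix initialised
-- to the sentinel -1 by a top-down memoized recursive function f(j,k) over a dict,
-- evaluating only the subproblems it actually reaches (objective: alternative, same cost).
-- The coordinate-compression / intervalList preamble is the same Python code in both
-- programs, so both ports share its transliteration (pvCompress / pvFillIl).

-- ===== SHARED HELPERS (identical Python lines in Source A and Source B) =====

-- pointList build + sort + the range(2n) first-of-run dict loop + intervalOrder;
-- returns (cnt, intervalOrder).  dict lookups use getD (-1): the key is always
-- present (every endpoint is in pointList), so the default never fires on a real run.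
def pvCompress (interval : List (Int × Int)) : Int × List (Int × Int) :=
  let pointList0 := interval.foldl (fun acc lr => (acc ++ [lr.1]) ++ [lr.2]) []
  let pointList := PySem.List.sorted pointList0 (fun x => x) false
  let n : Int := interval.length
  let dc := (PySem.List.pyRange 0 (2*n) 1).foldl
    (fun (s : PySem.Dict Int Int × Int) i =>
      if i = 0 ∨ ¬ (PySem.List.pyGetD pointList i 0 = PySem.List.pyGetD pointList (i-1) 0) then
        (s.1.insert (PySem.List.pyGetD pointList i 0) s.2, s.2 + 1)
      else s)
    (PySem.Dict.empty, 0)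
  (dc.2, interval.map (fun e => (dc.1.getD e.1 (-1), dc.1.getD e.2 (-1))))

-- 'for elem in intervalOrder: intervalList[elem[0]].append(elem[1])' — in-place append at
-- index elem[0], ported with List.set; exact since elem[0] is a rank, 0 ≤ elem[0] < len.
def pvFillIl (il : List (List Int)) (io : List (Int × Int)) : List (List Int) :=
  io.foldl (fun il e => il.set e.1.toNat (PySem.List.pyGetD il e.1 [] ++ [e.2])) il

-- ===== PORT A =====

-- 'for i in range(cnt): dp.append([]); intervalList.append([]); for j in range(cnt): dp[i].append(-1)'
def pvABuild (cnt : Int) : List (List Int) × List (List Int) :=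
  (PySem.List.pyRange 0 cnt 1).foldl
    (fun (st : List (List Int) × List (List Int)) i =>
      let dp := st.1 ++ [[]]
      let il := st.2 ++ [[]]
      let dp := (PySem.List.pyRange 0 cnt 1).foldl
        (fun dp _j => dp.set i.toNat (PySem.List.pyGetD dp i [] ++ [(-1 : Int)])) dp
      (dp, il))
    ([], [])

-- diagonal fill: 'for i in range(cnt): for j in range(cnt - i): …  dp[j][i+j] = ans1 + ans2'
def pvABody (il : List (List Int)) (i : Int) (dp : List (List Int)) (j : Int) : List (List Int) :=
  let a := (PySem.List.pyGetD il j []).foldl (fun (s : Int × Int) e =>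
      if e = i + j then (s.1 + 1, s.2)
      else if e < i + j ∧ s.2 < PySem.List.pyGetD (PySem.List.pyGetD dp j []) e 0
              + PySem.List.pyGetD (PySem.List.pyGetD dp (e+1) []) (i+j) 0 then
        (s.1, PySem.List.pyGetD (PySem.List.pyGetD dp j []) e 0
              + PySem.List.pyGetD (PySem.List.pyGetD dp (e+1) []) (i+j) 0)
      else s)
    (0, if ¬ i = 0 then PySem.List.pyGetD (PySem.List.pyGetD dp (j+1) []) (i+j) 0 else 0)
  dp.set j.toNat ((PySem.List.pyGetD dp j []).set (i+j).toNat (a.1 + a.2))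

def pvAFill (il : List (List Int)) (cnt : Int) (dp0 : List (List Int)) : List (List Int) :=
  (PySem.List.pyRange 0 cnt 1).foldl (fun dp i =>
    (PySem.List.pyRange 0 (cnt - i) 1).foldl (pvABody il i) dp)
    dp0

def pvRunCaseA (case : List (Int × Int)) : Int :=
  let c := pvCompress case
  let cnt := c.1
  let st := pvABuild cnt
  let il := pvFillIl st.2 c.2
  let dp := pvAFill il cnt st.1
  PySem.List.pyGetD (PySem.List.pyGetD dp 0 []) (cnt - 1) 0

def max_subset_size (test_cases : List (List (Int × Int))) : List Int :=
  test_cases.foldl (fun acc case => acc ++ [pvRunCaseA case]) []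

-- ===== PORT B =====

-- the 'for e in intervalList[j]' loop of f, threading the memo through each body
-- iteration; 'f' is the memoized recursion itself, passed in at one fuel level down.
def pvBGo (f : PySem.Dict (Int × Int) Int → Int → Int → PySem.Dict (Int × Int) Int × Int)
    (j k : Int) : List Int →
    PySem.Dict (Int × Int) Int × Int × Int → PySem.Dict (Int × Int) Int × Int × Int
  | [], st => st
  | e :: rest, st =>
    if e = k then pvBGo f j k rest (st.1, st.2.1 + 1, st.2.2)
    else if j ≤ e ∧ e < k then
      let r1 := f st.1 j e
      let r2 := f r1.1 (e + 1) k
      let c := r1.2 + r2.2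
      if st.2.2 < c then pvBGo f j k rest (r2.1, st.2.1, c)
      else pvBGo f j k rest (r2.1, st.2.1, st.2.2)
    else pvBGo f j k rest st

-- the memoized recursive 'def f(j, k)' of Source B, threading the memo dict through every
-- call.  The Nat fuel only makes the recursion structural (the depth is < fuel at every
-- real call site, proved in pvB_correct: a totality guard, not an algorithm switch).
def pvBRun (il : List (List Int)) : Nat → PySem.Dict (Int × Int) Int → Int → Int →
    PySem.Dict (Int × Int) Int × Int
  | 0, memo, _, _ => (memo, 0)
  | Nat.succ n, memo, j, k =>
    match memo.get? (j, k) with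
    | some got => (memo, got)
    | none =>
      let mb := if j < k then pvBRun il n memo (j + 1) k else (memo, 0)
      let s := pvBGo (pvBRun il n) j k (PySem.List.pyGetD il j []) (mb.1, 0, mb.2)
      (s.1.insert (j, k) (s.2.1 + s.2.2), s.2.1 + s.2.2)

def pvRunCaseB (case : List (Int × Int)) : Int :=
  let c := pvCompress case
  let cnt := c.1
  let il := pvFillIl ((PySem.List.pyRange 0 cnt 1).map (fun _ => ([] : List Int))) c.2
  (pvBRun il cnt.toNat PySem.Dict.empty 0 (cnt - 1)).2

def max_subset_size_alt (test_cases : List (List (Int × Int))) : List Int :=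
  test_cases.foldl (fun acc case => acc ++ [pvRunCaseB case]) []

-- ===== PRECONDITION & SPEC =====

-- Pre_ excludes only test cases containing an empty interval list: there cnt = 0 and
-- A raises IndexError on dp[0][cnt-1] (B likewise raises IndexError on intervalList[0]).
def Pre_max_subset_size (test_cases : List (List (Int × Int))) : Prop :=
  ∀ case ∈ test_cases, case ≠ []
instance (test_cases : List (List (Int × Int))) : Decidable (Pre_max_subset_size test_cases) := by
  unfold Pre_max_subset_size; infer_instance

def pvWitness_max_subset_size : (List (List (Int × Int))) := [[(1, 3), (2, 2), (3, 5)], [(0, 0)]]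

def Spec_max_subset_size (test_cases : List (List (Int × Int))) (out : List Int) : Prop :=
  out = max_subset_size_alt test_cases
instance (test_cases : List (List (Int × Int))) (out : List Int) : Decidable (Spec_max_subset_size test_cases out) := by
  unfold Spec_max_subset_size; infer_instance

-- ===== CLAIM (what is proved, stated in full; the proofs are below) =====
def Claim_equal_max_subset_size : Prop :=
  ∀ (test_cases : List (List (Int × Int))), Dom_max_subset_size test_cases →
    Pre_max_subset_size test_cases →
    Spec_max_subset_size test_cases (max_subset_size test_cases)

-- ===== LEMMAS AND PROOFS =====

-- The common value both programs compute: pvF il j k (j ≤ k), defined through a fuelled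
-- recursion pvFp (any fuel > (k-j).toNat gives the same value; proved below).
def pvFp (il : List (List Int)) : Nat → Int → Int → Int
  | 0, _, _ => 0
  | n+1, j, k =>
    let s := (PySem.List.pyGetD il j []).foldl (fun (s : Int × Int) e =>
        if e = k then (s.1 + 1, s.2)
        else if j ≤ e ∧ e < k then (s.1, max s.2 (pvFp il n j e + pvFp il n (e+1) k))
        else s)
      (0, if j < k then pvFp il n (j+1) k else 0)
    s.1 + s.2

def pvF (il : List (List Int)) (j k : Int) : Int := pvFp il ((k-j).toNat + 1) j k

theorem pvFp_fuel (il : List (List Int)) :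
    ∀ (n m : Nat) (j k : Int), j ≤ k → (k-j).toNat < n → (k-j).toNat < m →
      pvFp il n j k = pvFp il m j k := by
  intro n
  induction n with
  | zero => intro m j k _ hn _; omega
  | succ n ih =>
    intro m j k hjk hn hm
    obtain ⟨m', rfl⟩ : ∃ m', m = m' + 1 := ⟨m - 1, by omega⟩
    simp only [pvFp]
    have hbase : (if j < k then pvFp il n (j+1) k else 0)
        = (if j < k then pvFp il m' (j+1) k else 0) := by
      split_ifs with h
      · exact ih m' (j+1) k (by omega) (by omega) (by omega)
      · rfl
    have hf : (fun (s : Int × Int) e =>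
          if e = k then (s.1 + 1, s.2)
          else if j ≤ e ∧ e < k then (s.1, max s.2 (pvFp il n j e + pvFp il n (e+1) k))
          else s)
        = (fun (s : Int × Int) e =>
          if e = k then (s.1 + 1, s.2)
          else if j ≤ e ∧ e < k then (s.1, max s.2 (pvFp il m' j e + pvFp il m' (e+1) k))
          else s) := by
      funext s e
      by_cases h1 : e = k
      · simp [h1]
      · by_cases h2 : j ≤ e ∧ e < k
        · rw [if_neg h1, if_neg h1, if_pos h2, if_pos h2,
            ih m' j e h2.1 (by omega) (by omega), ih m' (e+1) k (by omega) (by omega) (by omega)]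
        · simp [h1, h2]
    rw [hbase, hf]

theorem pvF_fuel (il : List (List Int)) (n : Nat) (j k : Int) (hjk : j ≤ k)
    (hn : (k-j).toNat < n) : pvFp il n j k = pvF il j k :=
  pvFp_fuel il n ((k-j).toNat + 1) j k hjk hn (by omega)

theorem pvF_unfold (il : List (List Int)) (j k : Int) (h : j ≤ k) :
    pvF il j k =
      ((PySem.List.pyGetD il j []).foldl (fun (s : Int × Int) e =>
          if e = k then (s.1 + 1, s.2)
          else if j ≤ e ∧ e < k then (s.1, max s.2 (pvF il j e + pvF il (e+1) k))
          else s)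
        (0, if j < k then pvF il (j+1) k else 0)).1 +
      ((PySem.List.pyGetD il j []).foldl (fun (s : Int × Int) e =>
          if e = k then (s.1 + 1, s.2)
          else if j ≤ e ∧ e < k then (s.1, max s.2 (pvF il j e + pvF il (e+1) k))
          else s)
        (0, if j < k then pvF il (j+1) k else 0)).2 := by
  conv_lhs => rw [pvF]
  simp only [pvFp]
  have hbase : (if j < k then pvFp il ((k-j).toNat) (j+1) k else 0)
      = (if j < k then pvF il (j+1) k else 0) := by
    split_ifs with hlt
    · exact pvF_fuel il _ (j+1) k (by omega) (by omega)
    · rfl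
  have hf : (fun (s : Int × Int) e =>
        if e = k then (s.1 + 1, s.2)
        else if j ≤ e ∧ e < k then (s.1, max s.2 (pvFp il (k-j).toNat j e + pvFp il (k-j).toNat (e+1) k))
        else s)
      = (fun (s : Int × Int) e =>
        if e = k then (s.1 + 1, s.2)
        else if j ≤ e ∧ e < k then (s.1, max s.2 (pvF il j e + pvF il (e+1) k))
        else s) := by
    funext s e
    by_cases h1 : e = k
    · simp [h1]
    · by_cases h2 : j ≤ e ∧ e < k
      · rw [if_neg h1, if_neg h1, if_pos h2, if_pos h2,
          pvF_fuel il _ j e h2.1 (by omega), pvF_fuel il _ (e+1) k (by omega) (by omega)]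
      · simp [h1, h2]
  rw [hbase, hf]

theorem pvFp_nonneg (il : List (List Int)) :
    ∀ (n : Nat) (j k : Int), 0 ≤ pvFp il n j k := by
  intro n
  induction n with
  | zero => intro j k; simp [pvFp]
  | succ n ih =>
    intro j k
    simp only [pvFp]
    have : ∀ (l : List Int) (s : Int × Int), 0 ≤ s.1 → 0 ≤ s.2 →
        0 ≤ (l.foldl (fun (s : Int × Int) e =>
          if e = k then (s.1 + 1, s.2)
          else if j ≤ e ∧ e < k then (s.1, max s.2 (pvFp il n j e + pvFp il n (e+1) k))
          else s) s).1 + (l.foldl (fun (s : Int × Int) e =>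
          if e = k then (s.1 + 1, s.2)
          else if j ≤ e ∧ e < k then (s.1, max s.2 (pvFp il n j e + pvFp il n (e+1) k))
          else s) s).2 := by
      intro l
      induction l with
      | nil => intro s h1 h2; simpa using by omega
      | cons x t iht =>
        intro s h1 h2
        simp only [List.foldl_cons]
        by_cases hx : x = k
        · exact iht _ (by simp [hx]; omega) (by simp [hx]; omega)
        · by_cases hx2 : j ≤ x ∧ x < k
          · refine iht _ ?_ ?_
            · simp [hx, hx2]; omega
            · simp only [if_neg hx, if_pos hx2]
              exact le_trans h2 (le_max_left _ _)
          · exact iht _ (by simp [hx, hx2]; omega) (by simp [hx, hx2]; omega)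
    exact this _ (0, if j < k then pvFp il n (j+1) k else 0) le_rfl
      (by split_ifs with h; exact ih (j+1) k; exact le_rfl)

theorem pvF_nonneg (il : List (List Int)) (j k : Int) : 0 ≤ pvF il j k :=
  pvFp_nonneg il _ j k


-- ===== B-side: the memo invariant and correctness of the memoized recursion =====

def pvInvB (il : List (List Int)) (memo : PySem.Dict (Int × Int) Int) : Prop :=
  ∀ j k v : Int, memo.get? (j, k) = some v → v = pvF il j k

theorem pvInvB_insert (il : List (List Int)) (memo : PySem.Dict (Int × Int) Int)
    (j k : Int) (hinv : pvInvB il memo) :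
    pvInvB il (memo.insert (j, k) (pvF il j k)) := by
  intro j' k' v hv
  rw [PySem.Dict.get?_insert] at hv
  by_cases heq : (j', k') = (j, k)
  · rw [if_pos heq] at hv
    injection heq with e1 e2
    subst e1; subst e2
    injection hv with hv
    omega
  · rw [if_neg heq] at hv
    exact hinv j' k' v hv

theorem pvB_correct (il : List (List Int)) :
    ∀ (n : Nat) (memo : PySem.Dict (Int × Int) Int) (j k : Int),
      pvInvB il memo → j ≤ k → (k-j).toNat < n →
      pvInvB il (pvBRun il n memo j k).1 ∧ (pvBRun il n memo j k).2 = pvF il j k := by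
  intro n
  induction n with
  | zero => intro memo j k _ _ hn; omega
  | succ n ih =>
    intro memo j k hinv hjk hn
    -- the 'for e in intervalList[j]' loop follows pvF's pure fold, threading the memo
    have hgo : ∀ (l : List Int) (memo : PySem.Dict (Int × Int) Int) (ex b : Int),
        pvInvB il memo →
        pvInvB il (pvBGo (pvBRun il n) j k l (memo, ex, b)).1 ∧
        (pvBGo (pvBRun il n) j k l (memo, ex, b)).2
          = l.foldl (fun (s : Int × Int) e =>
              if e = k then (s.1 + 1, s.2)
              else if j ≤ e ∧ e < k then (s.1, max s.2 (pvF il j e + pvF il (e+1) k))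
              else s) (ex, b) := by
      intro l
      induction l with
      | nil => intro memo ex b hm; exact ⟨hm, rfl⟩
      | cons e rest ihl =>
        intro memo ex b hm
        rw [List.foldl_cons]
        by_cases h1 : e = k
        · simpa [pvBGo, h1] using ihl memo (ex + 1) b hm
        · by_cases h2 : j ≤ e ∧ e < k
          · have hr1 := ih memo j e hm h2.1 (by omega)
            have hr2 := ih (pvBRun il n memo j e).1 (e+1) k hr1.1 (by omega) (by omega)
            simp only [pvBGo, if_neg h1, if_pos h2, hr1.2, hr2.2]
            by_cases h3 : b < pvF il j e + pvF il (e+1) k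
            · rw [if_pos h3,
                show max b (pvF il j e + pvF il (e+1) k) = pvF il j e + pvF il (e+1) k
                  from max_eq_right (le_of_lt h3)]
              exact ihl _ ex _ hr2.1
            · rw [if_neg h3,
                show max b (pvF il j e + pvF il (e+1) k) = b from max_eq_left (by omega)]
              exact ihl _ ex b hr2.1
          · simpa [pvBGo, h1, h2] using ihl memo ex b hm
    cases hget : memo.get? (j, k) with
    | some v =>
      simp only [pvBRun, hget]
      exact ⟨hinv, hinv j k v hget⟩
    | none =>
      have hmb : pvInvB il (if j < k then pvBRun il n memo (j+1) k else (memo, 0)).1 ∧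
          (if j < k then pvBRun il n memo (j+1) k else (memo, 0)).2
            = (if j < k then pvF il (j+1) k else 0) := by
        split_ifs with hlt
        · exact ih memo (j+1) k hinv (by omega) (by omega)
        · exact ⟨hinv, rfl⟩
      simp only [pvBRun, hget]
      rw [hmb.2]
      have hg := hgo (PySem.List.pyGetD il j [])
        (if j < k then pvBRun il n memo (j+1) k else (memo, 0)).1 0
        (if j < k then pvF il (j+1) k else 0) hmb.1
      rw [hg.2, ← pvF_unfold il j k hjk]
      exact ⟨pvInvB_insert il _ j k hg.1, rfl⟩

theorem pvBRun_final (il : List (List Int)) (cnt : Int) (h1 : 1 ≤ cnt) :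
    (pvBRun il cnt.toNat PySem.Dict.empty 0 (cnt - 1)).2 = pvF il 0 (cnt - 1) := by
  refine (pvB_correct il cnt.toNat PySem.Dict.empty 0 (cnt - 1) ?_ (by omega) (by omega)).2
  intro j k v hv
  simp [PySem.Dict.get?, PySem.Dict.empty] at hv


-- ===== A-side: build loop characterisation, intervalList facts, compression facts =====

theorem pvABuild_inner (m : Nat) (l : List Int) :
    ∀ (A : List (List Int)) (r : List Int), A.length = m →
      l.foldl (fun dp (_j : Int) =>
          dp.set ((m : Int)).toNat (PySem.List.pyGetD dp (m : Int) [] ++ [(-1 : Int)])) (A ++ [r])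
        = A ++ [r ++ List.replicate l.length (-1)] := by
  induction l with
  | nil => intro A r _; simp
  | cons x t ih =>
    intro A r hA
    rw [List.foldl_cons]
    have hget : PySem.List.pyGetD (A ++ [r]) (m : Int) [] = r := by
      rw [PySem.List.pyGetD_natCast]; simp [← hA]
    have hset : (A ++ [r]).set ((m : Int)).toNat (r ++ [(-1 : Int)]) = A ++ [r ++ [(-1 : Int)]] := by
      have : ((m : Int)).toNat = A.length := by omega
      rw [this, List.set_append]; simp
    rw [hget, hset, ih A (r ++ [(-1 : Int)]) hA]
    simp [List.replicate_succ]

theorem pvABuild_eq (cnt : Int) (h : 0 ≤ cnt) :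
    pvABuild cnt
      = (List.replicate cnt.toNat (List.replicate cnt.toNat (-1)), List.replicate cnt.toNat []) := by
  have main : ∀ (t : Nat), (t : Int) ≤ cnt →
      (PySem.List.pyRange 0 (t : Int) 1).foldl
        (fun (st : List (List Int) × List (List Int)) i =>
          let dp := st.1 ++ [[]]
          let il := st.2 ++ [[]]
          let dp := (PySem.List.pyRange 0 cnt 1).foldl
            (fun dp _j => dp.set i.toNat (PySem.List.pyGetD dp i [] ++ [(-1 : Int)])) dp
          (dp, il))
        ([], [])
      = (List.replicate t (List.replicate cnt.toNat (-1)), List.replicate t []) := by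
    intro t
    induction t with
    | zero => intro _; simp [PySem.List.pyRange_one_eq_nil]
    | succ t ih =>
      intro ht
      push_cast
      rw [PySem.List.pyRange_one_succ_right (by omega), List.foldl_append, List.foldl_cons,
        List.foldl_nil, ih (by omega)]
      simp only []
      have hlen : (List.replicate t (List.replicate cnt.toNat (-1 : Int))).length = t := by simp
      rw [pvABuild_inner t (PySem.List.pyRange 0 cnt 1) _ [] hlen]
      have hrl : (PySem.List.pyRange 0 cnt 1).length = cnt.toNat := by
        rw [PySem.List.length_pyRange_one]; omega
      rw [hrl]
      simp [List.replicate_succ']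
  have := main cnt.toNat (by omega)
  unfold pvABuild
  rw [show ((cnt.toNat : Nat) : Int) = cnt from by omega] at this
  exact this

theorem pv_getD_mem_or_nil (il : List (List Int)) (i : Int) :
    PySem.List.pyGetD il i [] ∈ il ∨ PySem.List.pyGetD il i [] = [] := by
  rcases h : PySem.List.pyGet? il i with _ | r
  · right; simp [PySem.List.pyGetD, h]
  · left
    have hr : PySem.List.pyGetD il i [] = r := by simp [PySem.List.pyGetD, h]
    rw [hr]
    simp only [PySem.List.pyGet?] at h
    rcases Option.bind_eq_some_iff.1 h with ⟨k, _, hk⟩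
    exact List.mem_of_getElem? hk

theorem pvFillIl_mem (P : Int → Prop) (io : List (Int × Int)) :
    ∀ (il : List (List Int)), (∀ r ∈ il, ∀ e ∈ r, P e) → (∀ p ∈ io, P p.2) →
      ∀ r ∈ pvFillIl il io, ∀ e ∈ r, P e := by
  induction io with
  | nil => intro il hil _; exact hil
  | cons p t ih =>
    intro il hil hio
    show ∀ r ∈ pvFillIl (il.set p.1.toNat (PySem.List.pyGetD il p.1 [] ++ [p.2])) t, ∀ e ∈ r, P e
    refine ih _ ?_ (fun q hq => hio q (List.mem_cons_of_mem _ hq))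
    intro r hr e he
    rcases List.mem_or_eq_of_mem_set hr with hmem | rfl
    · exact hil r hmem e he
    · rcases List.mem_append.1 he with h1 | h2
      · rcases pv_getD_mem_or_nil il p.1 with hmem | hnil
        · exact hil _ hmem e h1
        · rw [hnil] at h1; simp at h1
      · have : e = p.2 := by simpa using h2
        exact this ▸ hio p (List.mem_cons_self)


-- ===== compression-dict invariant =====

theorem pvDict_inv (L : List Int) (m : Nat) (hm : m ≤ L.length) :
    (∀ x ∈ L.take m, ∃ v,
        ((PySem.List.pyRange 0 (m : Int) 1).foldl
          (fun (s : PySem.Dict Int Int × Int) i =>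
            if i = 0 ∨ ¬ (PySem.List.pyGetD L i 0 = PySem.List.pyGetD L (i-1) 0) then
              (s.1.insert (PySem.List.pyGetD L i 0) s.2, s.2 + 1)
            else s)
          (PySem.Dict.empty, 0)).1.get? x = some v ∧ 0 ≤ v ∧
          v < ((PySem.List.pyRange 0 (m : Int) 1).foldl
          (fun (s : PySem.Dict Int Int × Int) i =>
            if i = 0 ∨ ¬ (PySem.List.pyGetD L i 0 = PySem.List.pyGetD L (i-1) 0) then
              (s.1.insert (PySem.List.pyGetD L i 0) s.2, s.2 + 1)
            else s)
          (PySem.Dict.empty, 0)).2) ∧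
    0 ≤ ((PySem.List.pyRange 0 (m : Int) 1).foldl
          (fun (s : PySem.Dict Int Int × Int) i =>
            if i = 0 ∨ ¬ (PySem.List.pyGetD L i 0 = PySem.List.pyGetD L (i-1) 0) then
              (s.1.insert (PySem.List.pyGetD L i 0) s.2, s.2 + 1)
            else s)
          (PySem.Dict.empty, 0)).2 ∧
    (1 ≤ m → 1 ≤ ((PySem.List.pyRange 0 (m : Int) 1).foldl
          (fun (s : PySem.Dict Int Int × Int) i =>
            if i = 0 ∨ ¬ (PySem.List.pyGetD L i 0 = PySem.List.pyGetD L (i-1) 0) then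
              (s.1.insert (PySem.List.pyGetD L i 0) s.2, s.2 + 1)
            else s)
          (PySem.Dict.empty, 0)).2) := by
  induction m with
  | zero => simp [PySem.List.pyRange_one_eq_nil]
  | succ m ih =>
    have hm' : m ≤ L.length := by omega
    have hmL : m < L.length := by omega
    obtain ⟨IH1, IH2, IH3⟩ := ih hm'
    have hsplit : PySem.List.pyRange 0 ((m:Int)+1) 1
        = PySem.List.pyRange 0 (m:Int) 1 ++ [(m:Int)] := PySem.List.pyRange_one_succ_right (by omega)
    have hgetm : PySem.List.pyGetD L (m : Int) 0 = L[m] := by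
      rw [PySem.List.pyGetD_natCast]; simp [List.getD_eq_getElem?_getD, List.getElem?_eq_getElem hmL]
    have htake : L.take (m+1) = L.take m ++ [L[m]] := by
      rw [List.take_add_one, List.getElem?_eq_getElem hmL]; rfl
    refine ⟨?_, ?_, ?_⟩ <;>
      push_cast <;>
      rw [hsplit, List.foldl_append, List.foldl_cons, List.foldl_nil]
    · intro x hx
      by_cases hcond : (m:Int) = 0 ∨ ¬ (PySem.List.pyGetD L (m:Int) 0 = PySem.List.pyGetD L ((m:Int)-1) 0)
      · rw [if_pos hcond]
        dsimp only
        rw [hgetm, PySem.Dict.get?_insert]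
        by_cases hxm : x = L[m]
        · rw [if_pos hxm]
          exact ⟨_, rfl, IH2, by omega⟩
        · have hx' : x ∈ L.take m := by
            rw [htake] at hx
            rcases List.mem_append.1 hx with h | h
            · exact h
            · exact absurd (by simpa using h) hxm
          obtain ⟨v, hv, hv0, hvc⟩ := IH1 x hx'
          rw [if_neg hxm]
          exact ⟨v, hv, hv0, by omega⟩
      · rw [if_neg hcond]
        have hm0 : ¬ (m:Int) = 0 := fun hh => hcond (Or.inl hh)
        have heqprev : PySem.List.pyGetD L (↑m) 0 = PySem.List.pyGetD L (↑m - 1) 0 := by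
          by_contra hq
          exact hcond (Or.inr hq)
        have hm1 : 1 ≤ m := by omega
        have hx' : x ∈ L.take m := by
          rw [htake] at hx
          rcases List.mem_append.1 hx with h | h
          · exact h
          · have hxm : x = L[m] := by simpa using h
            have hprev : PySem.List.pyGetD L ((m:Int)-1) 0 = L[m-1] := by
              rw [show (m:Int)-1 = ((m-1 : Nat) : Int) from by omega, PySem.List.pyGetD_natCast]
              simp [List.getD_eq_getElem?_getD, List.getElem?_eq_getElem (by omega : m-1 < L.length)]
            have : x = L[m-1] := by rw [hxm, ← hgetm, heqprev, hprev]
            rw [this]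
            have : (L.take m)[m-1]'(by simp [List.length_take]; omega) = L[m-1] := List.getElem_take
            rw [← this]
            exact List.getElem_mem _
        exact IH1 x hx'
    · split_ifs with h
      · dsimp only; omega
      · exact IH2
    · intro _
      split_ifs with h
      · dsimp only; omega
      · have hm1 : 1 ≤ m := by
          by_contra hc
          exact h (Or.inl (by omega))
        exact IH3 hm1

theorem pv_pyGetD_get {α : Type} (xs : List α) (t : Int) (d : α) (h0 : 0 ≤ t)
    (hl : t.toNat < xs.length) : PySem.List.pyGetD xs t d = xs[t.toNat] := by
  conv_lhs => rw [show t = ((t.toNat : Nat) : Int) from by omega]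
  rw [PySem.List.pyGetD_natCast]
  simp [List.getD_eq_getElem?_getD, List.getElem?_eq_getElem hl]

theorem pvCompress_spec (interval : List (Int × Int)) (hne : interval ≠ []) :
    1 ≤ (pvCompress interval).1 ∧
      ∀ p ∈ (pvCompress interval).2,
        0 ≤ p.1 ∧ p.1 < (pvCompress interval).1 ∧ 0 ≤ p.2 ∧ p.2 < (pvCompress interval).1 := by
  have hfun : (fun (acc : List Int) (lr : Int × Int) => (acc ++ [lr.1]) ++ [lr.2])
      = fun acc lr => acc ++ [lr.1, lr.2] := by
    funext acc lr; simp
  have hL0 : interval.foldl (fun acc lr => (acc ++ [lr.1]) ++ [lr.2]) []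
      = interval.flatMap (fun lr => [lr.1, lr.2]) := by
    rw [hfun, PySem.List.foldl_append_eq_flatMap]; simp
  have hflatlen : (interval.flatMap (fun lr => [lr.1, lr.2])).length = 2 * interval.length := by
    simp [List.length_flatMap]
    induction interval with
    | nil => simp
    | cons x t ih => simp; omega
  simp only [pvCompress]
  rw [hL0]
  set L : List Int :=
    PySem.List.sorted (interval.flatMap (fun lr => [lr.1, lr.2])) (fun x => x) false with hLdef
  have hLlen : L.length = 2 * interval.length := by
    rw [hLdef, PySem.List.length_sorted, hflatlen]
  have hcast : 2 * (interval.length : Int) = ((L.length : Nat) : Int) := by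
    rw [hLlen]; push_cast; ring
  rw [hcast]
  obtain ⟨H1, _, H3⟩ := pvDict_inv L L.length le_rfl
  rw [List.take_length] at H1
  have hlen1 : 1 ≤ L.length := by
    have : interval.length ≠ 0 := fun hh => hne (List.eq_nil_of_length_eq_zero hh)
    omega
  refine ⟨H3 hlen1, ?_⟩
  intro p hp
  obtain ⟨lr, hlr, rfl⟩ := List.mem_map.1 hp
  have hmem1 : lr.1 ∈ L := by
    rw [hLdef, PySem.List.mem_sorted]
    exact List.mem_flatMap.2 ⟨lr, hlr, by simp⟩
  have hmem2 : lr.2 ∈ L := by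
    rw [hLdef, PySem.List.mem_sorted]
    exact List.mem_flatMap.2 ⟨lr, hlr, by simp⟩
  obtain ⟨v1, hv1, hv10, hv1c⟩ := H1 lr.1 hmem1
  obtain ⟨v2, hv2, hv20, hv2c⟩ := H1 lr.2 hmem2
  rw [PySem.Dict.getD_eq_get?_getD, PySem.Dict.getD_eq_get?_getD, hv1, hv2]
  exact ⟨hv10, hv1c, hv20, hv2c⟩

-- ===== A-side fill invariant =====

def pvInvA (il : List (List Int)) (cnt i j : Int) (dp : List (List Int)) : Prop :=
  dp.length = cnt.toNat ∧ (∀ r ∈ dp, r.length = cnt.toNat) ∧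
  ∀ j' k' : Int, 0 ≤ j' → j' < cnt → 0 ≤ k' → k' < cnt →
    PySem.List.pyGetD (PySem.List.pyGetD dp j' []) k' 0 =
      if j' ≤ k' ∧ (k' - j' < i ∨ (k' - j' = i ∧ j' < j)) then pvF il j' k' else -1

theorem pvA_step (il : List (List Int)) (cnt i j : Int) (dp : List (List Int))
    (hil_e : ∀ r ∈ il, ∀ e ∈ r, 0 ≤ e)
    (hi : 0 ≤ i) (hicnt : i < cnt) (hj : 0 ≤ j) (hjc : j < cnt - i)
    (hinv : pvInvA il cnt i j dp) : pvInvA il cnt i (j+1) (pvABody il i dp j) := by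
  obtain ⟨hlen, hrows, hcells⟩ := hinv
  have hrow_e : ∀ e ∈ PySem.List.pyGetD il j [], 0 ≤ e := by
    rcases pv_getD_mem_or_nil il j with hmem | hnil
    · exact hil_e _ hmem
    · rw [hnil]; intro e he; simp at he
  have hbase : (if ¬ i = 0 then PySem.List.pyGetD (PySem.List.pyGetD dp (j+1) []) (i+j) 0 else 0)
      = (if j < i + j then pvF il (j+1) (i+j) else 0) := by
    by_cases hi0 : i = 0
    · rw [if_neg (by simp [hi0]), if_neg (by omega)]
    · rw [if_pos hi0, if_pos (by omega),
        hcells (j+1) (i+j) (by omega) (by omega) (by omega) (by omega),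
        if_pos ⟨by omega, Or.inl (by omega)⟩]
  have hfold : ∀ (l : List Int), (∀ e ∈ l, 0 ≤ e) → ∀ s : Int × Int, 0 ≤ s.2 →
      (l.foldl (fun (s : Int × Int) e =>
          if e = i + j then (s.1 + 1, s.2)
          else if e < i + j ∧ s.2 < PySem.List.pyGetD (PySem.List.pyGetD dp j []) e 0
                  + PySem.List.pyGetD (PySem.List.pyGetD dp (e+1) []) (i+j) 0 then
            (s.1, PySem.List.pyGetD (PySem.List.pyGetD dp j []) e 0
                  + PySem.List.pyGetD (PySem.List.pyGetD dp (e+1) []) (i+j) 0)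
          else s) s)
        = (l.foldl (fun (s : Int × Int) e =>
          if e = i + j then (s.1 + 1, s.2)
          else if j ≤ e ∧ e < i + j then
            (s.1, max s.2 (pvF il j e + pvF il (e+1) (i+j)))
          else s) s) ∧
      0 ≤ (l.foldl (fun (s : Int × Int) e =>
          if e = i + j then (s.1 + 1, s.2)
          else if j ≤ e ∧ e < i + j then
            (s.1, max s.2 (pvF il j e + pvF il (e+1) (i+j)))
          else s) s).2 := by
    intro l
    induction l with
    | nil => intro _ s hs; exact ⟨rfl, hs⟩
    | cons e t ih =>
      intro hle s hs
      have he0 : 0 ≤ e := hle e List.mem_cons_self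
      have hte : ∀ e' ∈ t, 0 ≤ e' := fun e' he' => hle e' (List.mem_cons_of_mem _ he')
      rw [List.foldl_cons, List.foldl_cons]
      by_cases h1 : e = i + j
      · rw [if_pos h1, if_pos h1]
        exact ih hte _ hs
      · rw [if_neg h1, if_neg h1]
        by_cases h2 : j ≤ e ∧ e < i + j
        · have hv1 : PySem.List.pyGetD (PySem.List.pyGetD dp j []) e 0 = pvF il j e := by
            rw [hcells j e (by omega) (by omega) (by omega) (by omega),
              if_pos ⟨h2.1, Or.inl (by omega)⟩]
          have hv2 : PySem.List.pyGetD (PySem.List.pyGetD dp (e+1) []) (i+j) 0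
              = pvF il (e+1) (i+j) := by
            rw [hcells (e+1) (i+j) (by omega) (by omega) (by omega) (by omega),
              if_pos ⟨by omega, Or.inl (by omega)⟩]
          rw [if_pos h2, hv1, hv2]
          by_cases h3 : s.2 < pvF il j e + pvF il (e+1) (i+j)
          · rw [if_pos ⟨h2.2, h3⟩, show max s.2 (pvF il j e + pvF il (e+1) (i+j))
              = pvF il j e + pvF il (e+1) (i+j) from max_eq_right (le_of_lt h3)]
            exact ih hte _ (by
              have := pvF_nonneg il j e
              have := pvF_nonneg il (e+1) (i+j)
              dsimp only; omega)
          · rw [if_neg (by intro hc; exact h3 hc.2), show max s.2 (pvF il j e + pvF il (e+1) (i+j))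
              = s.2 from max_eq_left (by omega)]
            exact ih hte _ hs
        · rw [if_neg h2]
          by_cases h4 : e < i + j
          · -- e < j: both dp reads are -1, candidate -2 never beats s.2 ≥ 0
            have hej : e < j := by omega
            have hv1 : PySem.List.pyGetD (PySem.List.pyGetD dp j []) e 0 = -1 := by
              rw [hcells j e (by omega) (by omega) (by omega) (by omega),
                if_neg (by intro hc; omega)]
            have hv2 : PySem.List.pyGetD (PySem.List.pyGetD dp (e+1) []) (i+j) 0 = -1 := by
              rw [hcells (e+1) (i+j) (by omega) (by omega) (by omega) (by omega),
                if_neg (by intro hc; omega)]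
            rw [hv1, hv2, if_neg (by intro hc; omega)]
            exact ih hte _ hs
          · rw [if_neg (by intro hc; exact h4 hc.1)]
            exact ih hte _ hs
  have hbase2 : 0 ≤ (if j < i + j then pvF il (j+1) (i+j) else 0) := by
    split_ifs with h
    · exact pvF_nonneg il (j+1) (i+j)
    · exact le_rfl
  have hfold' := hfold (PySem.List.pyGetD il j []) hrow_e
    (0, if j < i + j then pvF il (j+1) (i+j) else 0) hbase2
  have hval : pvABody il i dp j
      = dp.set j.toNat ((PySem.List.pyGetD dp j []).set (i+j).toNat (pvF il j (i+j))) := by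
    unfold pvABody
    dsimp only
    rw [hbase, hfold'.1, ← pvF_unfold il j (i+j) (by omega)]
  rw [hval]
  have hrowj : PySem.List.pyGetD dp j [] = dp[j.toNat]'(by omega) :=
    pv_pyGetD_get dp j [] hj (by omega)
  have hrowjlen : (dp[j.toNat]'(by omega)).length = cnt.toNat :=
    hrows _ (List.getElem_mem _)
  have hmodlen : ((PySem.List.pyGetD dp j []).set (i+j).toNat (pvF il j (i+j))).length
      = cnt.toNat := by
    rw [List.length_set, hrowj, hrowjlen]
  refine ⟨by simp [hlen], ?_, ?_⟩
  · intro r hr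
    rcases List.mem_or_eq_of_mem_set hr with hmem | rfl
    · exact hrows r hmem
    · exact hmodlen
  · intro j' k' ha hb hc hd
    have hread : PySem.List.pyGetD
          (dp.set j.toNat ((PySem.List.pyGetD dp j []).set (i+j).toNat (pvF il j (i+j)))) j' []
        = if j' = j
            then (PySem.List.pyGetD dp j []).set (i+j).toNat (pvF il j (i+j))
            else PySem.List.pyGetD dp j' [] := by
      rw [pv_pyGetD_get _ j' [] ha (by simp [hlen]; omega), List.getElem_set]
      split_ifs with h1 h2 h2
      · rfl
      · exfalso; omega
      · exfalso; omega
      · exact (pv_pyGetD_get dp j' [] ha (by omega)).symm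
    rw [hread]
    by_cases hjj : j' = j
    · rw [if_pos hjj]
      subst hjj
      have hcol : PySem.List.pyGetD
            ((PySem.List.pyGetD dp j' []).set (i+j').toNat (pvF il j' (i+j'))) k' 0
          = if k' = i + j' then pvF il j' (i+j')
            else PySem.List.pyGetD (PySem.List.pyGetD dp j' []) k' 0 := by
        rw [pv_pyGetD_get _ k' 0 hc (by rw [hmodlen]; omega), List.getElem_set]
        split_ifs with h1 h2 h2
        · rfl
        · exfalso; omega
        · exfalso; omega
        · exact (pv_pyGetD_get _ k' 0 hc (by rw [hrowj, hrowjlen]; omega)).symm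
      rw [hcol]
      by_cases hkk : k' = i + j'
      · rw [if_pos hkk, if_pos ⟨by omega, Or.inr ⟨by omega, by omega⟩⟩, hkk]
      · rw [if_neg hkk, hcells j' k' ha hb hc hd]
        have hiff : (j' ≤ k' ∧ (k' - j' < i ∨ (k' - j' = i ∧ j' < j')))
            ↔ (j' ≤ k' ∧ (k' - j' < i ∨ (k' - j' = i ∧ j' < j' + 1))) := by omega
        simp only [hiff]
    · rw [if_neg hjj, hcells j' k' ha hb hc hd]
      have hiff : (j' ≤ k' ∧ (k' - j' < i ∨ (k' - j' = i ∧ j' < j)))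
          ↔ (j' ≤ k' ∧ (k' - j' < i ∨ (k' - j' = i ∧ j' < j + 1))) := by omega
      simp only [hiff]


theorem pvA_inner (il : List (List Int)) (cnt i : Int)
    (hil_e : ∀ r ∈ il, ∀ e ∈ r, 0 ≤ e) (hi : 0 ≤ i) (hicnt : i < cnt) :
    ∀ (t : Nat) (dp0 : List (List Int)), (t : Int) ≤ cnt - i → pvInvA il cnt i 0 dp0 →
      pvInvA il cnt i (t : Int) ((PySem.List.pyRange 0 (t : Int) 1).foldl (pvABody il i) dp0) := by
  intro t
  induction t with
  | zero =>
    intro dp0 _ hinv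
    simpa [PySem.List.pyRange_one_eq_nil] using hinv
  | succ t ih =>
    intro dp0 ht hinv
    push_cast
    rw [PySem.List.pyRange_one_succ_right (by omega), List.foldl_append, List.foldl_cons,
      List.foldl_nil]
    exact pvA_step il cnt i (t : Int) _ hil_e hi hicnt (by omega) (by omega)
      (ih dp0 (by omega) hinv)

theorem pvA_outer (il : List (List Int)) (cnt : Int)
    (hil_e : ∀ r ∈ il, ∀ e ∈ r, 0 ≤ e) (hcnt0 : 0 ≤ cnt) :
    ∀ (t : Nat), (t : Int) ≤ cnt →
      pvInvA il cnt (t : Int) 0 ((PySem.List.pyRange 0 (t : Int) 1).foldl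
        (fun dp i => (PySem.List.pyRange 0 (cnt - i) 1).foldl (pvABody il i) dp)
        (List.replicate cnt.toNat (List.replicate cnt.toNat (-1)))) := by
  intro t
  induction t with
  | zero =>
    intro _
    rw [show ((0:Nat):Int) = 0 from rfl, PySem.List.pyRange_one_eq_nil le_rfl, List.foldl_nil]
    refine ⟨by simp, by intro r hr; simp [List.eq_of_mem_replicate hr], ?_⟩
    intro j' k' ha hb hc hd
    have hrow : PySem.List.pyGetD (List.replicate cnt.toNat (List.replicate cnt.toNat (-1:Int))) j' []
        = List.replicate cnt.toNat (-1:Int) := by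
      rw [pv_pyGetD_get _ j' [] ha (by simp; omega), List.getElem_replicate]
    rw [hrow, pv_pyGetD_get _ k' 0 hc (by simp; omega), List.getElem_replicate,
      if_neg (by omega)]
  | succ t ih =>
    intro ht
    push_cast
    rw [PySem.List.pyRange_one_succ_right (by omega), List.foldl_append, List.foldl_cons,
      List.foldl_nil]
    have hmid := pvA_inner il cnt (t : Int) hil_e (by omega) (by omega)
      (cnt - (t : Int)).toNat _ (by omega) (ih (by omega))
    rw [show (((cnt - (t : Int)).toNat : Nat) : Int) = cnt - (t : Int) from by omega] at hmid
    obtain ⟨e1, e2, e3⟩ := hmid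
    refine ⟨e1, e2, ?_⟩
    intro j' k' ha hb hc hd
    rw [e3 j' k' ha hb hc hd]
    have hiff : (j' ≤ k' ∧ (k' - j' < (t:Int) ∨ (k' - j' = (t:Int) ∧ j' < cnt - (t:Int))))
        ↔ (j' ≤ k' ∧ (k' - j' < (t:Int) + 1 ∨ (k' - j' = (t:Int) + 1 ∧ j' < 0))) := by omega
    simp only [hiff]

theorem pvA_final (il : List (List Int)) (cnt : Int)
    (hil_e : ∀ r ∈ il, ∀ e ∈ r, 0 ≤ e) (h1 : 1 ≤ cnt) :
    PySem.List.pyGetD (PySem.List.pyGetD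
      (pvAFill il cnt (List.replicate cnt.toNat (List.replicate cnt.toNat (-1)))) 0 []) (cnt-1) 0
    = pvF il 0 (cnt-1) := by
  unfold pvAFill
  have h := pvA_outer il cnt hil_e (by omega) cnt.toNat (by omega)
  rw [show ((cnt.toNat : Nat) : Int) = cnt from by omega] at h
  obtain ⟨_, _, hcells⟩ := h
  rw [hcells 0 (cnt-1) le_rfl (by omega) (by omega) (by omega),
    if_pos ⟨by omega, Or.inl (by omega)⟩]

theorem pv_caseA_eq_caseB (case : List (Int × Int)) (h : case ≠ []) :
    pvRunCaseA case = pvRunCaseB case := by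
  obtain ⟨h1, hio⟩ := pvCompress_spec case h
  unfold pvRunCaseA pvRunCaseB
  dsimp only
  rw [pvABuild_eq (pvCompress case).1 (by omega)]
  dsimp only
  rw [List.map_const', PySem.List.length_pyRange_one,
    show (pvCompress case).1 - 0 = (pvCompress case).1 from by ring]
  have he : ∀ r ∈ pvFillIl (List.replicate (pvCompress case).1.toNat []) (pvCompress case).2,
      ∀ e ∈ r, 0 ≤ e := by
    refine pvFillIl_mem _ _ _ ?_ (fun p hp => (hio p hp).2.2.1)
    intro r hr e he'
    rw [List.eq_of_mem_replicate hr] at he'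
    simp at he'
  rw [pvA_final _ _ he h1, pvBRun_final _ _ h1]

-- ===== VERDICT (by name: the statement is the Claim_ definition above) =====
theorem max_subset_size_spec : Claim_equal_max_subset_size := by
  intro tc _ hpre
  unfold Spec_max_subset_size max_subset_size max_subset_size_alt
  rw [PySem.List.foldl_append_singleton_eq_map, PySem.List.foldl_append_singleton_eq_map]
  simp only [List.nil_append]
  exact List.map_congr_left (fun case hc => pv_caseA_eq_caseB case (hpre case hc))
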